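-- pv_equiv track=rewrite | github.com/m7mdony/GPC-FTW | 2013/smart/main.py | calculate
-- ===== SOURCE A (Python) =====
-- def  calculate(line):
--     line = "".join(line)
--     line = line.split("=")
--
--
--     total=0
--     total2=0
--     previous_sign2=1
--     previous_sign=1
--     temp=""
--     x_sign=1
--     for i in range(len(line)):
--         if "?" in line[i]:
--             for j in range(len(line[i])):
--                 if line[i][j]!= "+" and line[i][j]!= "-" and line[i][j]!= "?":
--
--                     temp+=line[i][j]
--                     if j==len(line[i])-1:
--                         total+=int(temp)*previous_sign
--                 else:
--                     if temp:
--                         total+=int(temp)*previous_sign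
--                     temp=""
--                     if line[i][j]=="+":
--                         previous_sign=1
--                     elif line[i][j]=="-":
--                         previous_sign=-1
--                     elif line[i][j]=="?":
--                         x_sign=previous_sign
--
--             temp=""
--         else:
--             for j in range(len(line[i])):
--                 if line[i][j]!= "+" and line[i][j]!= "-" and line[i][j]!= "?":
--                     temp+=line[i][j]
--                     if j==len(line[i])-1:
--                         total2+=int(temp)*previous_sign2
--                 else:
--                     if temp:
--                         total2+=int(temp)*previous_sign2
--                     temp=""
--                     if line[i][j]=="+":
--                         previous_sign2=1
--                     elif line[i][j]=="-":
--                         previous_sign2=-1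
--
--             temp=""
--     unsigned_answer=-1*total+total2
--     signed_answer= unsigned_answer*x_sign
--     return signed_answer
-- ===== SOURCE B (Python) =====
-- def calculate(line):
--     def tokens(s):
--         out, buf = [], []
--         for ch in s:
--             if ch in "+-?":
--                 if buf:
--                     out.append("".join(buf))
--                     buf = []
--                 out.append(ch)
--             else:
--                 buf.append(ch)
--         if buf:
--             out.append("".join(buf))
--         return out
--
--     total = 0
--     total2 = 0
--     sign_q = 1
--     sign_p = 1
--     x_sign = 1
--     for side in "".join(line).split("="):
--         if "?" in side:
--             for t in tokens(side):
--                 if t == "+":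
--                     sign_q = 1
--                 elif t == "-":
--                     sign_q = -1
--                 elif t == "?":
--                     x_sign = sign_q
--                 else:
--                     total += int(t) * sign_q
--         else:
--             for t in tokens(side):
--                 if t == "+":
--                     sign_p = 1
--                 elif t == "-":
--                     sign_p = -1
--                 else:
--                     total2 += int(t) * sign_p
--     return x_sign * (total2 - total)
-- ===== Notes on version B (the rewrite author's own statement) =====
-- stated objective: idiomatic
-- what changed: Replaces A's index loop with a temp buffer, last-index flush test and per-character sign bookkeeping by a tokenizer (runs vs. single '+'/'-'/'?' tokens) followed by a plain fold over the token list with a current-sign state.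
-- outside the precondition, e.g. on calculate(['1 2+?=3']): A raises ValueError, B raises ValueError
import Mathlib
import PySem

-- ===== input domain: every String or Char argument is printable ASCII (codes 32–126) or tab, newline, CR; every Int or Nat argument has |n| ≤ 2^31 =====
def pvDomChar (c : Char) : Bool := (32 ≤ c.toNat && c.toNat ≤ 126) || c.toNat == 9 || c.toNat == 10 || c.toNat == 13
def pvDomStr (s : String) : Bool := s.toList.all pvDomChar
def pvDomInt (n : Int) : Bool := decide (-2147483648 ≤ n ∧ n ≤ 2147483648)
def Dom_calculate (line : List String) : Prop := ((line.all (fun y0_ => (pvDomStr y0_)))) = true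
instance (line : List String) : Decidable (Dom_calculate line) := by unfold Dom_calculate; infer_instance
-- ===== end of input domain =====

-- B replaces A's char-by-char accumulation (index loop, temp buffer, end-of-string flush)
-- with a tokenizer producing sign/'?'/number tokens and a plain fold over the token list;
-- objective: simpler/idiomatic, same cost.

-- shared preprocessing (the identical first two Python lines of both programs):
-- the sides of "".join(line).split("="), as lists of chars
def pvSides (line : List String) : List (List Char) :=
  PySem.Chars.splitOn (PySem.Chars.join [] (line.map String.toList)) ['=']

-- int(t); Pre_ excludes the inputs where Python's int() raises, so the default is never hit there
def pvInt (t : List Char) : Int := (PySem.Int.ofChars? t).getD 0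

-- ===== PORT A =====
-- inner loop of A for a side containing '?': state (total, previous_sign, x_sign) plus the
-- temp buffer; recursion on the remaining chars, `rest = []` is A's `j == len(line[i])-1`
def aLoopQ : List Char → Int → Int → Int → List Char → Int × Int × Int
  | [], total, ps, xs, _temp => (total, ps, xs)
  | c :: rest, total, ps, xs, temp =>
    if c ≠ '+' ∧ c ≠ '-' ∧ c ≠ '?' then
      let temp' := temp ++ [c]
      if rest = [] then
        aLoopQ rest (total + pvInt temp' * ps) ps xs temp'
      else
        aLoopQ rest total ps xs temp'
    else
      let total' := if temp ≠ [] then total + pvInt temp * ps else total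
      let ps' := if c = '+' then 1 else if c = '-' then -1 else ps
      let xs' := if c = '?' then ps else xs
      aLoopQ rest total' ps' xs' []

-- inner loop of A for a side without '?': state (total2, previous_sign2) plus temp
def aLoopP : List Char → Int → Int → List Char → Int × Int
  | [], total2, ps2, _temp => (total2, ps2)
  | c :: rest, total2, ps2, temp =>
    if c ≠ '+' ∧ c ≠ '-' ∧ c ≠ '?' then
      let temp' := temp ++ [c]
      if rest = [] then
        aLoopP rest (total2 + pvInt temp' * ps2) ps2 temp'
      else
        aLoopP rest total2 ps2 temp'
    else
      let total2' := if temp ≠ [] then total2 + pvInt temp * ps2 else total2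
      let ps2' := if c = '+' then 1 else if c = '-' then -1 else ps2
      aLoopP rest total2' ps2' []

-- A's outer loop over the sides (temp is "" at the start of each side and reset after it)
def aOuter : List (List Char) → Int → Int → Int → Int → Int → Int × Int × Int
  | [], total, total2, _ps, _ps2, xs => (total, total2, xs)
  | s :: ss, total, total2, ps, ps2, xs =>
    if '?' ∈ s then
      let r := aLoopQ s total ps xs []
      aOuter ss r.1 total2 r.2.1 ps2 r.2.2
    else
      let r := aLoopP s total2 ps2 []
      aOuter ss total r.1 ps r.2 xs

def calculate (line : List String) : Int :=
  let r := aOuter (pvSides line) 0 0 1 1 1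
  let unsigned := -1 * r.1 + r.2.1
  unsigned * r.2.2

-- ===== PORT B =====
-- B's tokenizer: maximal runs of non-separator chars, and the separators '+' '-' '?' as
-- single-char tokens, in order (the Python helper `tokens`, buf as the accumulator)
def bTokens : List Char → List Char → List (List Char)
  | [], buf => if buf = [] then [] else [buf]
  | c :: rest, buf =>
    if c = '+' ∨ c = '-' ∨ c = '?' then
      (if buf = [] then [] else [buf]) ++ [c] :: bTokens rest []
    else
      bTokens rest (buf ++ [c])

-- B's fold over the tokens of a '?' side: state (total, sign_q, x_sign)
def bFoldQ : List (List Char) → Int → Int → Int → Int × Int × Int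
  | [], total, sq, xs => (total, sq, xs)
  | t :: ts, total, sq, xs =>
    if t = ['+'] then bFoldQ ts total 1 xs
    else if t = ['-'] then bFoldQ ts total (-1) xs
    else if t = ['?'] then bFoldQ ts total sq sq
    else bFoldQ ts (total + pvInt t * sq) sq xs

-- B's fold over the tokens of a side without '?': state (total2, sign_p)
def bFoldP : List (List Char) → Int → Int → Int × Int
  | [], total2, sp => (total2, sp)
  | t :: ts, total2, sp =>
    if t = ['+'] then bFoldP ts total2 1
    else if t = ['-'] then bFoldP ts total2 (-1)
    else bFoldP ts (total2 + pvInt t * sp) sp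

def bOuter : List (List Char) → Int → Int → Int → Int → Int → Int × Int × Int
  | [], total, total2, _sq, _sp, xs => (total, total2, xs)
  | s :: ss, total, total2, sq, sp, xs =>
    if '?' ∈ s then
      let r := bFoldQ (bTokens s []) total sq xs
      bOuter ss r.1 total2 r.2.1 sp r.2.2
    else
      let r := bFoldP (bTokens s []) total2 sp
      bOuter ss total r.1 sq r.2 xs

def calculate_alt (line : List String) : Int :=
  let r := bOuter (pvSides line) 0 0 1 1 1
  r.2.2 * (r.2.1 - r.1)

-- ===== PRECONDITION & SPEC =====
-- Pre_ excludes exactly the inputs on which Python's int() raises ValueError in A (some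
-- non-separator run between '+'/'-'/'?'/'=' is not an integer literal); B raises there too.
def Pre_calculate (line : List String) : Prop :=
  ∀ s ∈ pvSides line,
    ∀ t ∈ s.splitOnP (fun c => c == '+' || c == '-' || c == '?'),
      t ≠ [] → (PySem.Int.ofChars? t).isSome = true
instance (line : List String) : Decidable (Pre_calculate line) := by
  unfold Pre_calculate; infer_instance

def pvWitness_calculate : List String := ["1+?", "=4-2"]

def Spec_calculate (line : List String) (out : Int) : Prop := out = calculate_alt line
instance (line : List String) (out : Int) : Decidable (Spec_calculate line out) := by
  unfold Spec_calculate; infer_instance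

-- ===== CLAIM (what is proved, stated in full; the proofs are below) =====
def Claim_equal_calculate : Prop :=
  ∀ (line : List String), Dom_calculate line → Pre_calculate line → Spec_calculate line (calculate line)

-- ===== LEMMAS AND PROOFS =====

-- A's char loop on a '?' side equals B's fold over B's tokens, generalized over the buffer
theorem aLoopQ_eq (cs : List Char) : ∀ (total ps xs : Int) (temp : List Char),
    (∀ c ∈ temp, ¬ (c = '+' ∨ c = '-' ∨ c = '?')) →
    aLoopQ cs total ps xs temp =
      if cs = [] then (total, ps, xs) else bFoldQ (bTokens cs temp) total ps xs := by
  induction cs with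
  | nil => intro total ps xs temp _; simp [aLoopQ]
  | cons c rest ih =>
    intro total ps xs temp h
    simp only [reduceCtorEq, if_false]
    by_cases hc : c = '+' ∨ c = '-' ∨ c = '?'
    · have hne : ¬ (c ≠ '+' ∧ c ≠ '-' ∧ c ≠ '?') := by tauto
      rw [aLoopQ, if_neg hne, bTokens, if_pos hc, ih _ _ _ _ (by simp)]
      have hstep : ∀ (L : List (List Char)) (t0 : Int),
          bFoldQ ((if temp = [] then [] else [temp]) ++ [c] :: L) t0 ps xs =
          bFoldQ L (if temp ≠ [] then t0 + pvInt temp * ps else t0)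
            (if c = '+' then 1 else if c = '-' then -1 else ps)
            (if c = '?' then ps else xs) := by
        intro L t0
        by_cases ht : temp = []
        · subst ht
          rcases hc with rfl | rfl | rfl <;> simp [bFoldQ]
        · have h1 : temp ≠ ['+'] := fun hh => h '+' (hh ▸ List.mem_singleton.mpr rfl) (by tauto)
          have h2 : temp ≠ ['-'] := fun hh => h '-' (hh ▸ List.mem_singleton.mpr rfl) (by tauto)
          have h3 : temp ≠ ['?'] := fun hh => h '?' (hh ▸ List.mem_singleton.mpr rfl) (by tauto)
          rcases hc with rfl | rfl | rfl <;> simp [bFoldQ, ht, h1, h2, h3]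
      rw [hstep]
      by_cases hr : rest = []
      · subst hr; simp [bTokens, bFoldQ]
      · simp [hr]
    · have hyes : (c ≠ '+' ∧ c ≠ '-' ∧ c ≠ '?') := by tauto
      rw [aLoopQ, if_pos hyes, bTokens, if_neg hc]
      have htemp' : ∀ x ∈ temp ++ [c], ¬ (x = '+' ∨ x = '-' ∨ x = '?') := by
        intro x hx; rcases List.mem_append.mp hx with hx | hx
        · exact h x hx
        · simp only [List.mem_singleton] at hx; subst hx; exact hc
      by_cases hr : rest = []
      · subst hr
        have h1 : temp ++ [c] ≠ ['+'] :=
          fun hh => (htemp' '+' (hh ▸ by simp)) (by tauto)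
        have h2 : temp ++ [c] ≠ ['-'] :=
          fun hh => (htemp' '-' (hh ▸ by simp)) (by tauto)
        have h3 : temp ++ [c] ≠ ['?'] :=
          fun hh => (htemp' '?' (hh ▸ by simp)) (by tauto)
        simp [aLoopQ, bTokens, bFoldQ, h1, h2, h3]
      · rw [if_neg hr, ih _ _ _ _ htemp', if_neg hr]

-- same for a side without '?'
theorem aLoopP_eq (cs : List Char) : ∀ (total2 ps2 : Int) (temp : List Char),
    '?' ∉ cs →
    (∀ c ∈ temp, ¬ (c = '+' ∨ c = '-' ∨ c = '?')) →
    aLoopP cs total2 ps2 temp =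
      if cs = [] then (total2, ps2) else bFoldP (bTokens cs temp) total2 ps2 := by
  induction cs with
  | nil => intro total2 ps2 temp _ _; simp [aLoopP]
  | cons c rest ih =>
    intro total2 ps2 temp hq h
    have hq' : '?' ∉ rest := fun hh => hq (List.mem_cons_of_mem _ hh)
    have hcq : c ≠ '?' := fun hh => hq (hh ▸ List.mem_cons_self ..)
    simp only [reduceCtorEq, if_false]
    by_cases hc : c = '+' ∨ c = '-' ∨ c = '?'
    · have hne : ¬ (c ≠ '+' ∧ c ≠ '-' ∧ c ≠ '?') := by tauto
      rw [aLoopP, if_neg hne, bTokens, if_pos hc, ih _ _ _ hq' (by simp)]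
      have hstep : ∀ (L : List (List Char)) (t0 : Int),
          bFoldP ((if temp = [] then [] else [temp]) ++ [c] :: L) t0 ps2 =
          bFoldP L (if temp ≠ [] then t0 + pvInt temp * ps2 else t0)
            (if c = '+' then 1 else if c = '-' then -1 else ps2) := by
        intro L t0
        rcases hc with rfl | rfl | rfl
        · by_cases ht : temp = []
          · subst ht; simp [bFoldP]
          · have h1 : temp ≠ ['+'] := fun hh => h '+' (hh ▸ List.mem_singleton.mpr rfl) (by tauto)
            have h2 : temp ≠ ['-'] := fun hh => h '-' (hh ▸ List.mem_singleton.mpr rfl) (by tauto)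
            simp [bFoldP, ht, h1, h2]
        · by_cases ht : temp = []
          · subst ht; simp [bFoldP]
          · have h1 : temp ≠ ['+'] := fun hh => h '+' (hh ▸ List.mem_singleton.mpr rfl) (by tauto)
            have h2 : temp ≠ ['-'] := fun hh => h '-' (hh ▸ List.mem_singleton.mpr rfl) (by tauto)
            simp [bFoldP, ht, h1, h2]
        · exact absurd rfl hcq
      rw [hstep]
      by_cases hr : rest = []
      · subst hr; simp [bTokens, bFoldP]
      · simp [hr]
    · have hyes : (c ≠ '+' ∧ c ≠ '-' ∧ c ≠ '?') := by tauto
      rw [aLoopP, if_pos hyes, bTokens, if_neg hc]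
      have htemp' : ∀ x ∈ temp ++ [c], ¬ (x = '+' ∨ x = '-' ∨ x = '?') := by
        intro x hx; rcases List.mem_append.mp hx with hx | hx
        · exact h x hx
        · simp only [List.mem_singleton] at hx; subst hx; exact hc
      by_cases hr : rest = []
      · subst hr
        have h1 : temp ++ [c] ≠ ['+'] :=
          fun hh => (htemp' '+' (hh ▸ by simp)) (by tauto)
        have h2 : temp ++ [c] ≠ ['-'] :=
          fun hh => (htemp' '-' (hh ▸ by simp)) (by tauto)
        simp [aLoopP, bTokens, bFoldP, h1, h2]
      · rw [if_neg hr, ih _ _ _ hq' htemp', if_neg hr]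

theorem aLoopQ_eq_nil (cs : List Char) (total ps xs : Int) :
    aLoopQ cs total ps xs [] = bFoldQ (bTokens cs []) total ps xs := by
  rw [aLoopQ_eq cs total ps xs [] (by simp)]
  by_cases h : cs = []
  · subst h; simp [bTokens, bFoldQ]
  · rw [if_neg h]

theorem aLoopP_eq_nil (cs : List Char) (total2 ps2 : Int) (hq : '?' ∉ cs) :
    aLoopP cs total2 ps2 [] = bFoldP (bTokens cs []) total2 ps2 := by
  rw [aLoopP_eq cs total2 ps2 [] hq (by simp)]
  by_cases h : cs = []
  · subst h; simp [bTokens, bFoldP]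
  · rw [if_neg h]

theorem aOuter_eq (ss : List (List Char)) : ∀ (total total2 ps ps2 xs : Int),
    aOuter ss total total2 ps ps2 xs = bOuter ss total total2 ps ps2 xs := by
  induction ss with
  | nil => intro _ _ _ _ _; rfl
  | cons s ss ih =>
    intro total total2 ps ps2 xs
    by_cases hq : '?' ∈ s
    · simp only [aOuter, bOuter, if_pos hq, aLoopQ_eq_nil, ih]
    · simp only [aOuter, bOuter, if_neg hq, aLoopP_eq_nil _ _ _ hq, ih]

-- ===== VERDICT (by name: the statement is the Claim_ definition above) =====
theorem calculate_spec : Claim_equal_calculate := by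
  intro line _ _
  unfold Spec_calculate calculate calculate_alt
  rw [aOuter_eq]
  ring
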